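-- pv_equiv track=rewrite | github.com/dino3111/aulasFP | teste fp apf/APF - Recurso/aDone . aula05 - listas/exercicio 2/2.4.py | valor_medio
-- ===== SOURCE A (Python) =====
-- def valor_medio(lst):
--     max = lst[0]
--     min = lst[0]
--     for i in lst[1:]:
--         if i > max:
--             max = i
--         if min > i:
--             min = i
--     vm = (max + min ) // 2
--     count = 0
--     for i in lst:
--         if i < vm:
--             count += 1
--     return vm,count
-- ===== SOURCE B (Python) =====
-- def valor_medio(lst):
--     s = sorted(lst)
--     vm = (s[0] + s[-1]) // 2
--     # binary search for the leftmost element >= vm: its index is the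
--     # number of elements strictly below vm
--     lo, hi = 0, len(s)
--     while lo < hi:
--         mid = (lo + hi) // 2
--         if s[mid] < vm:
--             lo = mid + 1
--         else:
--             hi = mid
--     return vm, lo
-- ===== Notes on version B (the rewrite author's own statement) =====
-- stated objective: alternative
-- what changed: B sorts the list once, reads min/max as the first/last element of the sorted array, and obtains the below-midpoint count with a binary search instead of A's two linear scans.
import Mathlib
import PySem

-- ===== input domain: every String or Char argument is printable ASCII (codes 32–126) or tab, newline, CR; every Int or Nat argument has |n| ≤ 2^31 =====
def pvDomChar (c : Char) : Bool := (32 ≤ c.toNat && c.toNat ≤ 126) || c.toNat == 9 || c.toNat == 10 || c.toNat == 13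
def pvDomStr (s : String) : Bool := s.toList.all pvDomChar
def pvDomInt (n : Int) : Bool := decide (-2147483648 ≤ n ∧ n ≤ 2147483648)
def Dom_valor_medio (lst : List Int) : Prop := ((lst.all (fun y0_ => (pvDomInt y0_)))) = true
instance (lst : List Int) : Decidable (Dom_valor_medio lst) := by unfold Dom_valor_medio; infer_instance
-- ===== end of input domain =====

-- B replaces A's two linear scans by sort + first/last element + binary search (alternative decomposition, not faster).
-- ===== PORT A =====
def valor_medio (lst : List Int) : Int × Int :=
  -- max = lst[0]; min = lst[0]   (lst[0] raises IndexError on []; excluded by Pre_)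
  let m0 : Int := (PySem.List.pyGet? lst 0).getD 0
  -- for i in lst[1:]: if i > max: max = i ; if min > i: min = i
  let mm : Int × Int :=
    (PySem.List.slice lst (some 1) none).foldl
      (fun (p : Int × Int) i =>
        let mx := if i > p.1 then i else p.1
        let mn := if p.2 > i then i else p.2
        (mx, mn)) (m0, m0)
  let vm : Int := PySem.Int.floordiv (mm.1 + mm.2) 2
  -- count = 0; for i in lst: if i < vm: count += 1
  let count : Int := lst.foldl (fun c i => if i < vm then c + 1 else c) 0
  (vm, count)

-- ===== PORT B =====
-- hand-written binary-search loop of Source B; fuel = initial hi-lo span bound (the Python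
-- while-loop terminates since hi - lo shrinks; indices stay in range so getD is exact)
def pvBsLoop (s : List Int) (vm : Int) : Nat → Nat → Nat → Nat
  | 0, lo, _ => lo
  | fuel + 1, lo, hi =>
    if lo < hi then
      let mid := (lo + hi) / 2
      if s.getD mid 0 < vm then pvBsLoop s vm fuel (mid + 1) hi
      else pvBsLoop s vm fuel lo mid
    else lo

def valor_medio_alt (lst : List Int) : Int × Int :=
  let s := PySem.List.sorted lst (fun x => x) false
  -- vm = (s[0] + s[-1]) // 2   (s[0]/s[-1] raise IndexError on []; excluded by Pre_)
  let vm : Int := PySem.Int.floordiv ((PySem.List.pyGet? s 0).getD 0 + (PySem.List.pyGet? s (-1)).getD 0) 2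
  -- lo, hi = 0, len(s); while lo < hi: …
  ((vm : Int), (pvBsLoop s vm s.length 0 s.length : Int))

-- ===== PRECONDITION & SPEC =====
-- Pre_ excludes only the empty list, on which both A and B raise IndexError (lst[0]).
def Pre_valor_medio (lst : List Int) : Prop := lst ≠ []
instance (lst : List Int) : Decidable (Pre_valor_medio lst) := by unfold Pre_valor_medio; infer_instance
def pvWitness_valor_medio : List Int := ([3, 1, 7, 1])
def Spec_valor_medio (lst : List Int) (out : Int × Int) : Prop := out = valor_medio_alt lst
instance (lst : List Int) (out : Int × Int) : Decidable (Spec_valor_medio lst out) := by unfold Spec_valor_medio; infer_instance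

-- ===== CLAIM (what is proved, stated in full; the proofs are below) =====
def Claim_equal_valor_medio : Prop := ∀ (lst : List Int), Dom_valor_medio lst → Pre_valor_medio lst → Spec_valor_medio lst (valor_medio lst)

-- ===== LEMMAS AND PROOFS =====

-- A's body-of-loop updates are max / min
lemma pv_if_max (a b : Int) : (if b > a then b else a) = max a b := by
  simp only [max_def]; split_ifs <;> omega

lemma pv_if_min (a b : Int) : (if a > b then b else a) = min a b := by
  simp only [min_def]; split_ifs <;> omega

-- A's single fold splits into a max-fold and a min-fold
lemma pv_foldA_eq (t : List Int) (mx mn : Int) :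
    t.foldl (fun (p : Int × Int) i =>
        let mx := if i > p.1 then i else p.1
        let mn := if p.2 > i then i else p.2
        (mx, mn)) (mx, mn)
      = (t.foldl max mx, t.foldl min mn) := by
  induction t generalizing mx mn with
  | nil => rfl
  | cons b t ih =>
      simp only [List.foldl_cons]
      rw [pv_if_max, pv_if_min, ih]

lemma pv_foldl_max_mem (a : Int) (t : List Int) : t.foldl max a ∈ a :: t := by
  induction t generalizing a with
  | nil => simp
  | cons b t ih =>
      have h := ih (max a b)
      simp only [List.foldl_cons]
      rcases max_choice a b with hm | hm <;> rw [hm] at h ⊢ <;>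
        rcases List.mem_cons.mp h with h' | h' <;> simp [h']

lemma pv_self_le_foldl_max (a : Int) (t : List Int) : a ≤ t.foldl max a := by
  induction t generalizing a with
  | nil => simp
  | cons b t ih =>
      exact le_trans (le_max_left a b) (ih (max a b))

lemma pv_le_foldl_max (a x : Int) (t : List Int) (hx : x ∈ a :: t) :
    x ≤ t.foldl max a := by
  induction t generalizing a with
  | nil => simp at hx; simp [hx]
  | cons b t ih =>
      simp only [List.foldl_cons]
      rcases List.mem_cons.mp hx with h | h
      · subst h; exact le_trans (le_max_left x b) (pv_self_le_foldl_max _ t)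
      · rcases List.mem_cons.mp h with h' | h'
        · subst h'; exact le_trans (le_max_right a x) (pv_self_le_foldl_max _ t)
        · exact ih (max a b) (List.mem_cons_of_mem _ h')

lemma pv_foldl_min_mem (a : Int) (t : List Int) : t.foldl min a ∈ a :: t := by
  induction t generalizing a with
  | nil => simp
  | cons b t ih =>
      have h := ih (min a b)
      simp only [List.foldl_cons]
      rcases min_choice a b with hm | hm <;> rw [hm] at h ⊢ <;>
        rcases List.mem_cons.mp h with h' | h' <;> simp [h']

lemma pv_foldl_min_le_self (a : Int) (t : List Int) : t.foldl min a ≤ a := by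
  induction t generalizing a with
  | nil => simp
  | cons b t ih =>
      exact le_trans (ih (min a b)) (min_le_left a b)

lemma pv_foldl_min_le (a x : Int) (t : List Int) (hx : x ∈ a :: t) :
    t.foldl min a ≤ x := by
  induction t generalizing a with
  | nil => simp at hx; simp [hx]
  | cons b t ih =>
      simp only [List.foldl_cons]
      rcases List.mem_cons.mp hx with h | h
      · subst h; exact le_trans (pv_foldl_min_le_self _ t) (min_le_left x b)
      · rcases List.mem_cons.mp h with h' | h'
        · subst h'; exact le_trans (pv_foldl_min_le_self _ t) (min_le_right a x)
        · exact ih (min a b) (List.mem_cons_of_mem _ h')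

-- A's counting loop is countP
lemma pv_foldl_count (vm : Int) (l : List Int) (c : Int) :
    l.foldl (fun c i => if i < vm then c + 1 else c) c
      = c + (l.countP (fun i => decide (i < vm)) : Int) := by
  induction l generalizing c with
  | nil => simp
  | cons b t ih =>
      simp only [List.foldl_cons, List.countP_cons]
      by_cases h : b < vm <;> simp [h, ih] ; ring

-- countP of a predicate true exactly on the first lo indices
lemma pv_countP_split (s : List Int) (vm : Int) (lo : Nat) (hlen : lo ≤ s.length)
    (h : ∀ j (hj : j < s.length), s[j] < vm ↔ j < lo) :
    s.countP (fun i => decide (i < vm)) = lo := by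
  conv_lhs => rw [← List.take_append_drop lo s]
  rw [List.countP_append]
  have h1 : (s.take lo).countP (fun i => decide (i < vm)) = (s.take lo).length := by
    apply List.countP_eq_length.mpr
    intro x hx
    rcases List.mem_iff_getElem.mp hx with ⟨j, hj, hxj⟩
    have hjlo : j < lo := lt_of_lt_of_le hj (by simp)
    have hjlen : j < s.length := by
      have := hj; rw [List.length_take] at this; omega
    have hg : (s.take lo)[j] = s[j] := List.getElem_take
    simp only [decide_eq_true_eq]
    rw [← hxj, hg]
    exact (h j hjlen).mpr hjlo
  have h2 : (s.drop lo).countP (fun i => decide (i < vm)) = 0 := by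
    apply List.countP_eq_zero.mpr
    intro x hx
    rcases List.mem_iff_getElem.mp hx with ⟨j, hj, hxj⟩
    have hjlen : lo + j < s.length := by
      have := hj; rw [List.length_drop] at this; omega
    have hg : (s.drop lo)[j] = s[lo + j] := List.getElem_drop
    simp only [decide_eq_true_eq]
    rw [← hxj, hg]
    intro hlt
    exact absurd ((h (lo + j) hjlen).mp hlt) (by omega)
  rw [h1, h2, List.length_take]
  omega

-- binary-search invariant: pvBsLoop returns the count of elements < vm
lemma pv_bsLoop_spec (s : List Int) (vm : Int) (hs : s.Pairwise (· ≤ ·)) :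
    ∀ fuel lo hi, lo ≤ hi → hi ≤ s.length → hi - lo ≤ fuel →
    (∀ j (hj : j < s.length), j < lo → s[j] < vm) →
    (∀ j (hj : j < s.length), hi ≤ j → ¬ s[j] < vm) →
    pvBsLoop s vm fuel lo hi = s.countP (fun i => decide (i < vm)) := by
  have hmono : ∀ p q (hq : q < s.length) (hpq : p ≤ q),
      s[p]'(lt_of_le_of_lt hpq hq) ≤ s[q] := by
    intro p q hq hpq
    rcases Nat.lt_or_ge p q with h | h
    · exact (List.pairwise_iff_getElem.mp hs) p q _ hq h
    · have : p = q := le_antisymm hpq h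
      subst this; exact le_rfl
  intro fuel
  induction fuel with
  | zero =>
      intro lo hi h1 h2 h3 hlo hhi
      have : lo = hi := by omega
      subst this
      simp only [pvBsLoop]
      exact (pv_countP_split s vm lo h2 (fun j hj =>
        ⟨fun h => by by_contra hc; exact hhi j hj (by omega) h, hlo j hj⟩)).symm
  | succ fuel ih =>
      intro lo hi h1 h2 h3 hlo hhi
      simp only [pvBsLoop]
      by_cases hlt : lo < hi
      · simp only [if_pos hlt]
        have hmid : (lo + hi) / 2 < s.length := by omega
        have hgetD : s.getD ((lo + hi) / 2) 0 = s[(lo + hi) / 2] :=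
          List.getD_eq_getElem s 0 hmid
        rw [hgetD]
        by_cases hv : s[(lo + hi) / 2] < vm
        · simp only [if_pos hv]
          apply ih ((lo + hi) / 2 + 1) hi (by omega) h2 (by omega) _ hhi
          intro j hj hjlt
          exact lt_of_le_of_lt (hmono j ((lo + hi) / 2) hmid (by omega)) hv
        · simp only [if_neg hv]
          apply ih lo ((lo + hi) / 2) (by omega) (by omega) (by omega) hlo
          intro j hj hjge hc
          exact hv (lt_of_le_of_lt (hmono ((lo + hi) / 2) j hj hjge) hc)
      · simp only [if_neg hlt]
        have : lo = hi := by omega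
        subst this
        exact (pv_countP_split s vm lo h2 (fun j hj =>
          ⟨fun h => by by_contra hc; exact hhi j hj (by omega) h, hlo j hj⟩)).symm

-- ===== VERDICT (by name: the statement is the Claim_ definition above) =====
theorem valor_medio_spec : Claim_equal_valor_medio := by
  intro lst _ hpre
  unfold Spec_valor_medio
  obtain ⟨a, t, rfl⟩ : ∃ a t, lst = a :: t := by
    cases lst with
    | nil => exact absurd rfl hpre
    | cons a t => exact ⟨a, t, rfl⟩
  -- B's sorted list and its extremes
  have hperm : (PySem.List.sorted (a :: t) (fun x => x) false).Perm (a :: t) :=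
    PySem.List.sorted_perm _ _ _
  have hsne : PySem.List.sorted (a :: t) (fun x => x) false ≠ [] := by
    rw [Ne, PySem.List.sorted_eq_nil_iff]; simp
  obtain ⟨m, r, hs⟩ : ∃ m r, PySem.List.sorted (a :: t) (fun x => x) false = m :: r := by
    cases h : PySem.List.sorted (a :: t) (fun x => x) false with
    | nil => exact absurd h hsne
    | cons m r => exact ⟨m, r, rfl⟩
  -- the head of the sorted list is A's running minimum
  have hmin : m = t.foldl min a := by
    have h1 : ∀ y ∈ (a :: t), m ≤ y := fun y hy =>
      PySem.List.key_head_sorted_le (a :: t) (fun x => x) hs y hy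
    have h2 : m ∈ (a :: t) := by
      rw [← PySem.List.mem_sorted (a :: t) (fun x => x) false, hs]
      exact List.mem_cons_self
    exact le_antisymm (h1 _ (pv_foldl_min_mem a t)) (pv_foldl_min_le a m t h2)
  -- the last element of the sorted list is A's running maximum
  have hmax : (PySem.List.sorted (a :: t) (fun x => x) false).getLast hsne
      = t.foldl max a := by
    have h1 : ∀ y ∈ (a :: t),
        y ≤ (PySem.List.sorted (a :: t) (fun x => x) false).getLast hsne := by
      intro y hy
      rw [← PySem.List.mem_sorted (a :: t) (fun x => x) false] at hy
      obtain ⟨p, hp, rfl⟩ := List.mem_iff_getElem.mp hy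
      rw [List.getLast_eq_getElem]
      exact PySem.List.key_sorted_getElem_mono (a :: t) (fun x => x)
        (by omega) (by omega)
    have h2 : (PySem.List.sorted (a :: t) (fun x => x) false).getLast hsne ∈ (a :: t) := by
      rw [← PySem.List.mem_sorted (a :: t) (fun x => x) false]
      exact List.getLast_mem hsne
    exact le_antisymm (pv_le_foldl_max a _ t h2) (h1 _ (pv_foldl_max_mem a t))
  -- evaluate the indexings in both ports
  have hget0 : PySem.List.pyGet? (PySem.List.sorted (a :: t) (fun x => x) false) 0
      = some m := by rw [hs]; exact PySem.List.pyGet?_zero_cons m r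
  have hgetsome : PySem.List.pyGet? (PySem.List.sorted (a :: t) (fun x => x) false) (-1)
      = some ((PySem.List.sorted (a :: t) (fun x => x) false).getLast hsne) := by
    rw [PySem.List.pyGet?_neg_one]
    exact List.getLast?_eq_some_getLast hsne
  have hA0 : PySem.List.pyGet? (a :: t) 0 = some a := PySem.List.pyGet?_zero_cons a t
  have hslice : PySem.List.slice (a :: t) (some 1) none = t := by
    rw [PySem.List.slice_from_one]; rfl
  -- both programs compute the same midpoint
  set vm : Int := PySem.Int.floordiv (t.foldl max a + t.foldl min a) 2 with hvm
  have hvmB : PySem.Int.floordiv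
      ((PySem.List.pyGet? (PySem.List.sorted (a :: t) (fun x => x) false) 0).getD 0
        + (PySem.List.pyGet? (PySem.List.sorted (a :: t) (fun x => x) false) (-1)).getD 0) 2
      = vm := by
    rw [hget0, hgetsome]
    simp only [Option.getD_some]
    rw [hmax, hmin, hvm, Int.add_comm]
  -- the binary search counts the elements below vm
  have hcount : pvBsLoop (PySem.List.sorted (a :: t) (fun x => x) false) vm
      (PySem.List.sorted (a :: t) (fun x => x) false).length 0
      (PySem.List.sorted (a :: t) (fun x => x) false).length
      = (a :: t).countP (fun i => decide (i < vm)) := by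
    rw [← List.Perm.countP_eq _ hperm]
    exact pv_bsLoop_spec _ vm (PySem.List.sorted_pairwise (a :: t) (fun x => x)) _ 0 _
      (by omega) le_rfl (by omega)
      (fun j hj hjlt => absurd hjlt (by omega))
      (fun j hj hge => absurd hge (by omega))
  -- assemble
  show valor_medio (a :: t) = valor_medio_alt (a :: t)
  unfold valor_medio valor_medio_alt
  simp only [hA0, Option.getD_some, hslice, pv_foldA_eq, hvmB]
  rw [pv_foldl_count, hcount]
  simp
  rw [hvm, PySem.Int.floordiv_eq_ediv_of_pos (by norm_num : (0:Int) < 2)]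
  exact ⟨rfl, rfl⟩
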